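-- pv_equiv track=rewrite | github.com/aloosley/persistable | persistable/util/dict.py | update
-- ===== SOURCE A (Python) =====
-- def update(dict1, dict2, overwrite=True, append=True):
--     """ overwrites dict1 with dict2 """
--     if overwrite and append:
--         dict1.update(dict2)
--     if overwrite and not append:
--         for k in dict1:
--             if k in dict2:
--                 dict1[k] = dict2[k]
--     if not overwrite and append:
--         for k in dict2:
--             if k not in dict1:
--                 dict1[k] = dict2[k]
--     return dict1
-- ===== SOURCE B (Python) =====
-- def update(dict1, dict2, overwrite=True, append=True):
--     """ overwrites dict1 with dict2 """
--     for k, v in dict2.items():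
--         if overwrite if k in dict1 else append:
--             dict1[k] = v
--     return dict1
-- ===== Notes on version B (the rewrite author's own statement) =====
-- stated objective: simpler
-- what changed: Replaces A's three flag-guarded branches (one of which scans dict1) with a single loop over dict2.items() that writes a key iff the relevant flag (overwrite for existing keys, append for new ones) is set.
import Mathlib
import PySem

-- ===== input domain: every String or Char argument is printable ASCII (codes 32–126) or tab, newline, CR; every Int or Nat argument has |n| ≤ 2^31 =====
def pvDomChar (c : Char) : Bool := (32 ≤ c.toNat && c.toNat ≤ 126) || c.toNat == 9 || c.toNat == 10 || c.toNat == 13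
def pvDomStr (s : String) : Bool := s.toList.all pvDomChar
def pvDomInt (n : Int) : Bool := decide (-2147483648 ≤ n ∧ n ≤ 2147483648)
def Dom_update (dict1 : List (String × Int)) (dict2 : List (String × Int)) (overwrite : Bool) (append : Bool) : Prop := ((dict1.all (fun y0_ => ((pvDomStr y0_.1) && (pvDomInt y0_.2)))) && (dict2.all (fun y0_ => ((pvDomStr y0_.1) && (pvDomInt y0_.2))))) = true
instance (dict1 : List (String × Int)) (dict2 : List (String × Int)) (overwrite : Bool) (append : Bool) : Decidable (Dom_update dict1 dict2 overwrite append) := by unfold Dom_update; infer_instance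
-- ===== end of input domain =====

-- B collapses A's three flag-guarded branches into one loop over dict2.items(); both A and B mutate dict1 in place the same way (the equivalence below is about the returned dict).


-- ===== PORT A =====
-- literal transliteration of A: three flag-guarded branches; dicts are PySem.Dict built from the assoc lists
def update (dict1 : List (String × Int)) (dict2 : List (String × Int)) (overwrite : Bool) (append : Bool) : List (String × Int) :=
  let d2 : PySem.Dict String Int := PySem.Dict.ofList dict2
  let d1 : PySem.Dict String Int := PySem.Dict.ofList dict1
  -- if overwrite and append: dict1.update(dict2)
  let d1 := if overwrite && append then d1.update d2.items else d1
  -- if overwrite and not append: for k in dict1: if k in dict2: dict1[k] = dict2[k]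
  let d1 := if overwrite && !append then
      d1.keys.foldl (fun d k => if d2.contains k then d.insert k (d2.getD k 0) else d) d1
    else d1
  -- if not overwrite and append: for k in dict2: if k not in dict1: dict1[k] = dict2[k]
  let d1 := if !overwrite && append then
      d2.keys.foldl (fun d k => if !(d.contains k) then d.insert k (d2.getD k 0) else d) d1
    else d1
  d1.items

-- ===== PORT B =====
-- literal transliteration of B: one loop over dict2.items()
def update_alt (dict1 : List (String × Int)) (dict2 : List (String × Int)) (overwrite : Bool) (append : Bool) : List (String × Int) :=
  let d2 : PySem.Dict String Int := PySem.Dict.ofList dict2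
  let d1 : PySem.Dict String Int := PySem.Dict.ofList dict1
  (d2.items.foldl (fun d kv =>
      if (if d.contains kv.1 then overwrite else append) then d.insert kv.1 kv.2 else d) d1).items

-- ===== PRECONDITION & SPEC =====
def Spec_update (dict1 : List (String × Int)) (dict2 : List (String × Int)) (overwrite : Bool) (append : Bool) (out : List (String × Int)) : Prop := out = update_alt dict1 dict2 overwrite append
instance (dict1 : List (String × Int)) (dict2 : List (String × Int)) (overwrite : Bool) (append : Bool) (out : List (String × Int)) : Decidable (Spec_update dict1 dict2 overwrite append out) := by unfold Spec_update; infer_instance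

-- ===== CLAIM (what is proved, stated in full; the proofs are below) =====
def Claim_equal_update : Prop := ∀ (dict1 : List (String × Int)) (dict2 : List (String × Int)) (overwrite : Bool) (append : Bool), Dom_update dict1 dict2 overwrite append → Spec_update dict1 dict2 overwrite append (update dict1 dict2 overwrite append)

-- ===== LEMMAS AND PROOFS =====

-- a fold whose step never changes the state is the identity
theorem foldl_id {α β : Type} (l : List β) (d : α) : l.foldl (fun d _ => d) d = d := by
  induction l generalizing d with
  | nil => rfl
  | cons b l ih => simpa using ih d

-- the pointwise effect of B's loop (overwrite = true case): first match in l
def fB (l : List (String × Int)) (p : String × Int) : String × Int :=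
  match l.find? (fun q => q.1 == p.1) with
  | some q => (p.1, q.2)
  | none => p

-- the pointwise effect of A's overwrite-only loop over a key list ks
def fA (d2 : PySem.Dict String Int) (ks : List String) (p : String × Int) : String × Int :=
  if ks.contains p.1 && d2.contains p.1 then (p.1, d2.getD p.1 0) else p

theorem lemB (l : List (String × Int)) :
    ∀ d : PySem.Dict String Int, (l.map Prod.fst).Nodup →
    (l.foldl (fun d kv => if d.contains kv.1 then d.insert kv.1 kv.2 else d) d).items
      = d.items.map (fB l) := by
  induction l with
  | nil =>
    intro d _
    rw [show fB [] = fun p => p from rfl]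
    simp
  | cons kv l ih =>
    rintro d hnd
    obtain ⟨k, v⟩ := kv
    simp only [List.map_cons, List.nodup_cons] at hnd
    rw [List.foldl_cons]
    by_cases hc : d.contains k = true
    · rw [if_pos hc, ih _ hnd.2, PySem.Dict.items_insert_of_contains _ _ hc, List.map_map]
      apply List.map_congr_left
      intro p _
      by_cases hk : p.1 = k
      · have hfind : l.find? (fun q => q.1 == k) = none := by
          rw [List.find?_eq_none]
          intro q hq
          simp only [beq_iff_eq]
          intro h
          exact hnd.1 (h ▸ List.mem_map_of_mem hq)
        simp [Function.comp, fB, hk, hfind]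
      · have hk2 : (k == p.1) = false := beq_eq_false_iff_ne.mpr (Ne.symm hk)
        simp [Function.comp, fB, hk, hk2]
    · rw [if_neg hc, ih _ hnd.2]
      apply List.map_congr_left
      intro p hp
      have hk1 : p.1 ≠ k := by
        intro h
        apply hc
        unfold PySem.Dict.contains
        rw [List.any_eq_true]
        exact ⟨p, hp, by simp [h]⟩
      have hk2 : (k == p.1) = false := beq_eq_false_iff_ne.mpr (Ne.symm hk1)
      simp [fB, List.find?_cons, hk2]

theorem lemA (d2 : PySem.Dict String Int) (ks : List String) :
    ∀ d : PySem.Dict String Int, ks.Nodup → (∀ k ∈ ks, d.contains k = true) →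
    (ks.foldl (fun d k => if d2.contains k then d.insert k (d2.getD k 0) else d) d).items
      = d.items.map (fA d2 ks) := by
  induction ks with
  | nil =>
    intro d _ _
    rw [show fA d2 [] = fun p => p from rfl]
    simp
  | cons k ks ih =>
    intro d hnd hmem
    simp only [List.nodup_cons] at hnd
    rw [List.foldl_cons]
    by_cases hc : d2.contains k = true
    · have hdk : d.contains k = true := hmem k (by simp)
      have hmem' : ∀ j ∈ ks, (d.insert k (d2.getD k 0)).contains j = true := by
        intro j hj
        rw [PySem.Dict.contains_insert]
        simp [hmem j (List.mem_cons_of_mem _ hj)]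
      rw [if_pos hc, ih _ hnd.2 hmem', PySem.Dict.items_insert_of_contains _ _ hdk, List.map_map]
      apply List.map_congr_left
      intro p _
      by_cases hk : p.1 = k
      · have hknot : ks.contains k = false := by simpa using hnd.1
        simp [Function.comp, fA, hk, hknot, hc]
      · simp [Function.comp, fA, hk]
    · rw [if_neg hc, ih _ hnd.2 (fun j hj => hmem j (List.mem_cons_of_mem _ hj))]
      apply List.map_congr_left
      intro p _
      by_cases hk : p.1 = k
      · simp [fA, hk, hc]
      · simp [fA, hk]

theorem fB_items_eq (d2 : PySem.Dict String Int) (p : String × Int) :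
    fB d2.items p = if d2.contains p.1 then (p.1, d2.getD p.1 0) else p := by
  unfold fB PySem.Dict.contains PySem.Dict.getD PySem.Dict.get?
  cases hf : d2.items.find? (fun q => q.1 == p.1) with
  | none =>
    have h : d2.items.any (fun q => q.1 == p.1) = false := by
      rw [Bool.eq_false_iff, Ne, List.any_eq_true]
      rintro ⟨q, hq, hq1⟩
      exact (List.find?_eq_none.mp hf q hq) hq1
    simp [h]
  | some q =>
    have hq1 : (q.1 == p.1) = true := by simpa using List.find?_some hf
    have h : d2.items.any (fun q => q.1 == p.1) = true :=
      List.any_eq_true.mpr ⟨q, List.mem_of_find?_eq_some hf, hq1⟩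
    simp [h, hf]

-- ===== VERDICT (by name: the statement is the Claim_ definition above) =====
theorem update_spec : Claim_equal_update := by
  intro dict1 dict2 overwrite append _
  unfold Spec_update update update_alt
  set d2 : PySem.Dict String Int := PySem.Dict.ofList dict2 with hd2
  set d1 : PySem.Dict String Int := PySem.Dict.ofList dict1 with hd1
  have hnd2 : d2.keys.Nodup := PySem.Dict.nodup_keys_ofList _
  have hnd1 : d1.keys.Nodup := PySem.Dict.nodup_keys_ofList _
  cases overwrite <;> cases append <;>
    simp only [Bool.and_self, Bool.and_true, Bool.and_false, Bool.true_and, Bool.false_and,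
      Bool.not_true, Bool.not_false, Bool.false_eq_true, eq_self_iff_true, if_true, if_false,
      reduceIte]
  · -- overwrite = false, append = false: B's loop never writes
    have he : (fun (d : PySem.Dict String Int) (kv : String × Int) =>
        if (if d.contains kv.1 then false else false) then d.insert kv.1 kv.2 else d)
        = fun d _ => d := by
      funext d kv; simp
    rw [he, foldl_id]
  · -- overwrite = false, append = true
    have he : (fun (d : PySem.Dict String Int) (kv : String × Int) =>
        if (if d.contains kv.1 then false else true) then d.insert kv.1 kv.2 else d)
        = fun d kv => if !(d.contains kv.1) then d.insert kv.1 kv.2 else d := by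
      funext d kv; cases h : d.contains kv.1 <;> simp [h]
    rw [he, PySem.Dict.items_eq_map_keys d2 hnd2 0, List.foldl_map]
  · -- overwrite = true, append = false
    have he : (fun (d : PySem.Dict String Int) (kv : String × Int) =>
        if (if d.contains kv.1 then true else false) then d.insert kv.1 kv.2 else d)
        = fun d kv => if d.contains kv.1 then d.insert kv.1 kv.2 else d := by
      funext d kv; cases h : d.contains kv.1 <;> simp [h]
    rw [he]
    rw [lemA d2 d1.keys d1 hnd1 (fun k hk => (PySem.Dict.contains_iff_mem_keys d1 k).mpr hk),
      lemB d2.items d1 hnd2]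
    apply List.map_congr_left
    intro p hp
    have hpm : p.1 ∈ d1.keys := by
      simp only [PySem.Dict.keys, List.mem_map]
      exact ⟨p, hp, rfl⟩
    rw [fB_items_eq]
    simp [fA, hpm]
  · -- overwrite = true, append = true
    have he : (fun (d : PySem.Dict String Int) (kv : String × Int) =>
        if (if d.contains kv.1 then true else true) then d.insert kv.1 kv.2 else d)
        = fun d kv => d.insert kv.1 kv.2 := by
      funext d kv; simp
    rw [he]
    rfl
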